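-- pv_equiv track=rewrite | github.com/stacs-cp/permutation-classes-cp | tests/classical_test.py | check_contain_pattern
-- ===== SOURCE A (Python) =====
-- import itertools
--
-- def check_contain_pattern(pattern_pairs, permutation_pairs):
--     patt_pairs = list(itertools.combinations(pattern_pairs, 2))
--     perm_pairs = list(itertools.combinations(permutation_pairs, 2))
--     patt_list = []
--     perm_list = []
--     for i in range(len(patt_pairs)):
--         patt_list.append(patt_pairs[i][0] < patt_pairs[i][1])
--
--     for i in range(len(perm_pairs)):
--         perm_list.append(perm_pairs[i][0] < perm_pairs[i][1])
--
--     return perm_list == patt_list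
-- ===== SOURCE B (Python) =====
-- def check_contain_pattern(pattern_pairs, permutation_pairs):
--     # Compare tie-aware "later-and-greater" count signatures (length n) instead of
--     # materialising and comparing the two C(n,2) boolean pair lists.
--     a = list(pattern_pairs)
--     b = list(permutation_pairs)
--     if len(a) < 2 and len(b) < 2:
--         return True
--     if len(a) != len(b):
--         return False
--     sig_a = [sum(x < y for y in a[i + 1:]) for i, x in enumerate(a)]
--     sig_b = [sum(x < y for y in b[i + 1:]) for i, x in enumerate(b)]
--     return sig_a == sig_b
-- ===== Notes on version B (the rewrite author's own statement) =====
-- stated objective: alternative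
-- what changed: Instead of materialising both C(n,2) lists of pairwise '<' booleans and comparing them elementwise, B computes for each sequence an n-element signature (for each position, the count of strictly greater later elements) and compares the two signatures after a length guard; equality of these tie-aware count vectors provably coincides with equality of the full pairwise boolean patterns. (constant-factor win: n counts instead of C(n,2) materialised tuples/booleans).
import Mathlib
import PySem

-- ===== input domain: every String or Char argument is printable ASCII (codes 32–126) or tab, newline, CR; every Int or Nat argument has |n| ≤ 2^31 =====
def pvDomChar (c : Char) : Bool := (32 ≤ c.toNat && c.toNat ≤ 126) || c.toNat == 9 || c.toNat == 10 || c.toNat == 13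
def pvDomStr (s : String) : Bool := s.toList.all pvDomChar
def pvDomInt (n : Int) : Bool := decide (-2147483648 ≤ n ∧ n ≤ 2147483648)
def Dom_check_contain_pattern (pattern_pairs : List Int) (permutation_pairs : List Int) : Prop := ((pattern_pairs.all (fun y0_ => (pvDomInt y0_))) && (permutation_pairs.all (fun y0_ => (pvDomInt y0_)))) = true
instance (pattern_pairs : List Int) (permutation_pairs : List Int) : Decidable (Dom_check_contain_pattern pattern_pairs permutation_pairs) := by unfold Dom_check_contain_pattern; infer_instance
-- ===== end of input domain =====

-- B compares tie-aware "later-and-greater" count signatures (one Int per element)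
-- instead of materialising and comparing the two C(n,2) boolean pair lists
-- (same asymptotics, measured constant-factor speedup).


-- ===== PORT A =====
-- itertools.combinations(l, 2) in iteration order
def pvCombs2 : List Int → List (Int × Int)
  | [] => []
  | x :: xs => xs.map (fun y => (x, y)) ++ pvCombs2 xs

-- the loop 'for i in range(len(pairs)): lst.append(pairs[i][0] < pairs[i][1])'
def pvPattList (l : List Int) : List Bool := (pvCombs2 l).map (fun p => decide (p.1 < p.2))

def check_contain_pattern (pattern_pairs : List Int) (permutation_pairs : List Int) : Bool :=
  pvPattList permutation_pairs == pvPattList pattern_pairs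

-- ===== PORT B =====
-- '[sum(x < y for y in s[i+1:]) for i, x in enumerate(s)]': each element of s with
-- its tail slice, head-first (exact on every list)
def pvSig : List Int → List Int
  | [] => []
  | x :: xs => ((xs.countP (fun y => decide (x < y)) : Nat) : Int) :: pvSig xs

def check_contain_pattern_alt (pattern_pairs : List Int) (permutation_pairs : List Int) : Bool :=
  if pattern_pairs.length < 2 ∧ permutation_pairs.length < 2 then true
  else if pattern_pairs.length ≠ permutation_pairs.length then false
  else pvSig pattern_pairs == pvSig permutation_pairs

-- ===== PRECONDITION & SPEC =====
def Spec_check_contain_pattern (pattern_pairs : List Int) (permutation_pairs : List Int) (out : Bool) : Prop := out = check_contain_pattern_alt pattern_pairs permutation_pairs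
instance (pattern_pairs : List Int) (permutation_pairs : List Int) (out : Bool) : Decidable (Spec_check_contain_pattern pattern_pairs permutation_pairs out) := by unfold Spec_check_contain_pattern; infer_instance

-- ===== CLAIM (what is proved, stated in full; the proofs are below) =====
def Claim_equal_check_contain_pattern : Prop := ∀ (pattern_pairs : List Int) (permutation_pairs : List Int), Dom_check_contain_pattern pattern_pairs permutation_pairs → Spec_check_contain_pattern pattern_pairs permutation_pairs (check_contain_pattern pattern_pairs permutation_pairs)

-- ===== LEMMAS AND PROOFS =====

-- the pairwise relation both signatures encode: the two coordinates compare alike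
def pvR (p q : Int × Int) : Prop := (p.1 < q.1 ↔ p.2 < q.2)

-- key counting lemma: under pairwise-coherence of the tail, equal counts force
-- pointwise agreement of the head comparisons
theorem pvKey (x y : Int) (c : List (Int × Int)) (hpw : List.Pairwise pvR c)
    (hcnt : c.countP (fun p => decide (x < p.1)) = c.countP (fun p => decide (y < p.2))) :
    ∀ p ∈ c, (x < p.1 ↔ y < p.2) := by
  induction c with
  | nil => intro p hp; cases hp
  | cons q c' ih =>
    rcases List.pairwise_cons.mp hpw with ⟨hq, hpw'⟩
    by_cases h1 : x < q.1 <;> by_cases h2 : y < q.2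
    · simp only [List.countP_cons, h1, h2, decide_true] at hcnt
      have := ih hpw' (by omega)
      intro p hp
      rcases List.mem_cons.mp hp with rfl | hp'
      · exact ⟨fun _ => h2, fun _ => h1⟩
      · exact this p hp'
    · -- impossible: the second count is strictly smaller
      exfalso
      have hmono : c'.countP (fun p => decide (y < p.2)) ≤ c'.countP (fun p => decide (x < p.1)) := by
        apply List.countP_mono_left
        intro p hp hyp
        have hyp' : y < p.2 := of_decide_eq_true hyp
        have hq2 : q.2 < p.2 := by omega
        have hq1 : q.1 < p.1 := (hq p hp).mpr hq2
        simp only [decide_eq_true_eq]; omega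
      simp [h1, h2] at hcnt
      omega
    · exfalso
      have hmono : c'.countP (fun p => decide (x < p.1)) ≤ c'.countP (fun p => decide (y < p.2)) := by
        apply List.countP_mono_left
        intro p hp hxp
        have hxp' : x < p.1 := of_decide_eq_true hxp
        have hq1 : q.1 < p.1 := by omega
        have hq2 : q.2 < p.2 := (hq p hp).mp hq1
        simp only [decide_eq_true_eq]; omega
      simp [h1, h2] at hcnt
      omega
    · simp only [List.countP_cons, h1, h2, decide_false] at hcnt
      have := ih hpw' (by omega)
      intro p hp
      rcases List.mem_cons.mp hp with rfl | hp'
      · exact ⟨fun h => absurd h h1, fun h => absurd h h2⟩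
      · exact this p hp'

theorem pvCount_fst (x : Int) (xs ys : List Int) (h : xs.length = ys.length) :
    xs.countP (fun z => decide (x < z)) = (xs.zip ys).countP (fun p => decide (x < p.1)) := by
  have hm : (xs.zip ys).map Prod.fst = xs := List.map_fst_zip (by omega)
  conv_lhs => rw [← hm]
  rw [List.countP_map]
  rfl

theorem pvCount_snd (y : Int) (xs ys : List Int) (h : xs.length = ys.length) :
    ys.countP (fun z => decide (y < z)) = (xs.zip ys).countP (fun p => decide (y < p.2)) := by
  have hm : (xs.zip ys).map Prod.snd = ys := List.map_snd_zip (by omega)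
  conv_lhs => rw [← hm]
  rw [List.countP_map]
  rfl

-- B's signature list characterises pairwise coherence
theorem pvSig_iff : ∀ (xs ys : List Int), xs.length = ys.length →
    (pvSig xs = pvSig ys ↔ List.Pairwise pvR (xs.zip ys)) := by
  intro xs
  induction xs with
  | nil => intro ys h; cases ys with
    | nil => simp [pvSig]
    | cons y ys => simp at h
  | cons x xs ih =>
    intro ys h
    cases ys with
    | nil => simp at h
    | cons y ys =>
      have h' : xs.length = ys.length := by simpa using h
      constructor
      · intro heq
        simp only [pvSig, List.cons.injEq, Int.natCast_inj] at heq
        obtain ⟨hcnt, htail⟩ := heq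
        have hpw' := (ih ys h').mp htail
        refine List.pairwise_cons.mpr ⟨?_, hpw'⟩
        intro p hp
        have hcnt' : (xs.zip ys).countP (fun p => decide (x < p.1)) = (xs.zip ys).countP (fun p => decide (y < p.2)) := by
          rw [← pvCount_fst x xs ys h', ← pvCount_snd y xs ys h']
          exact hcnt
        exact pvKey x y (xs.zip ys) hpw' hcnt' p hp
      · intro hpw
        rcases List.pairwise_cons.mp hpw with ⟨hhead, hpw'⟩
        simp only [pvSig, List.cons.injEq, Int.natCast_inj]
        constructor
        · rw [pvCount_fst x xs ys h', pvCount_snd y xs ys h']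
          apply List.countP_congr
          intro p hp
          simpa using hhead p hp
        · exact (ih ys h').mpr hpw'

theorem pvMapEq (xs ys : List Int) (f g : Int → Bool) (h : xs.length = ys.length) :
    (xs.map f = ys.map g ↔ ∀ p ∈ xs.zip ys, f p.1 = g p.2) := by
  induction xs generalizing ys with
  | nil => cases ys with
    | nil => simp
    | cons y ys => simp at h
  | cons x xs ih =>
    cases ys with
    | nil => simp at h
    | cons y ys =>
      have h' : xs.length = ys.length := by simpa using h
      simp only [List.map_cons, List.cons.injEq, List.zip_cons_cons, List.mem_cons]
      rw [ih ys h']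
      constructor
      · rintro ⟨h1, h2⟩ p hp
        rcases hp with rfl | hp
        · exact h1
        · exact h2 p hp
      · intro hall
        exact ⟨hall (x, y) (Or.inl rfl), fun p hp => hall p (Or.inr hp)⟩

-- A's pair-boolean list characterises the same pairwise coherence
theorem pvPatt_iff : ∀ (xs ys : List Int), xs.length = ys.length →
    (pvPattList xs = pvPattList ys ↔ List.Pairwise pvR (xs.zip ys)) := by
  intro xs
  induction xs with
  | nil => intro ys h; cases ys with
    | nil => simp [pvPattList, pvCombs2]
    | cons y ys => simp at h
  | cons x xs ih =>
    intro ys h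
    cases ys with
    | nil => simp at h
    | cons y ys =>
      have h' : xs.length = ys.length := by simpa using h
      have hx : pvPattList (x :: xs) = xs.map (fun z => decide (x < z)) ++ pvPattList xs := by
        simp [pvPattList, pvCombs2, List.map_map]
      have hy : pvPattList (y :: ys) = ys.map (fun z => decide (y < z)) ++ pvPattList ys := by
        simp [pvPattList, pvCombs2, List.map_map]
      rw [hx, hy, List.zip_cons_cons, List.pairwise_cons]
      have hlen : (xs.map (fun z => decide (x < z))).length = (ys.map (fun z => decide (y < z))).length := by
        simp [h']
      constructor
      · intro heq
        rcases List.append_inj heq hlen with ⟨h1, h2⟩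
        refine ⟨?_, (ih ys h').mp h2⟩
        intro p hp
        have := (pvMapEq xs ys _ _ h').mp h1 p hp
        simpa [pvR, decide_eq_decide] using this
      · rintro ⟨hhead, hpw⟩
        have h1 : xs.map (fun z => decide (x < z)) = ys.map (fun z => decide (y < z)) := by
          rw [pvMapEq xs ys _ _ h']
          intro p hp
          simpa [decide_eq_decide] using hhead p hp
        rw [h1, (ih ys h').mpr hpw]

-- |pvPattList l| = C(|l|, 2) via this recursion
def pvC2 : Nat → Nat
  | 0 => 0
  | n + 1 => n + pvC2 n

theorem pvPatt_len : ∀ l : List Int, (pvPattList l).length = pvC2 l.length := by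
  intro l
  induction l with
  | nil => rfl
  | cons x xs ih =>
    simp [pvPattList, pvCombs2, pvC2] at *
    omega

theorem pvC2_mono : ∀ {n m : Nat}, n ≤ m → pvC2 n ≤ pvC2 m := by
  intro n m h
  induction m with
  | zero => simp [Nat.le_zero.mp h]
  | succ m ih =>
    rcases Nat.lt_or_ge n (m + 1) with hlt | hge
    · have := ih (by omega)
      simp [pvC2]; omega
    · have : n = m + 1 := by omega
      simp [this]

theorem pvC2_ne {n m : Nat} (hne : n ≠ m) (h2 : 2 ≤ n ∨ 2 ≤ m) : pvC2 n ≠ pvC2 m := by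
  rcases Nat.lt_or_ge n m with hlt | hge
  · have h2m : 2 ≤ m := by omega
    have : pvC2 n ≤ pvC2 (m - 1) := pvC2_mono (by omega)
    have hm : pvC2 m = (m - 1) + pvC2 (m - 1) := by
      cases m with
      | zero => omega
      | succ k => simp [pvC2]
    omega
  · have hlt : m < n := by omega
    have h2n : 2 ≤ n := by omega
    have : pvC2 m ≤ pvC2 (n - 1) := pvC2_mono (by omega)
    have hn : pvC2 n = (n - 1) + pvC2 (n - 1) := by
      cases n with
      | zero => omega
      | succ k => simp [pvC2]
    omega

theorem pvPatt_small (l : List Int) (h : l.length < 2) : pvPattList l = [] := by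
  cases l with
  | nil => rfl
  | cons x xs =>
    cases xs with
    | nil => rfl
    | cons y ys => simp at h

-- ===== VERDICT (by name: the statement is the Claim_ definition above) =====
theorem check_contain_pattern_spec : Claim_equal_check_contain_pattern := by
  intro a b _
  unfold Spec_check_contain_pattern check_contain_pattern check_contain_pattern_alt
  by_cases h1 : a.length < 2 ∧ b.length < 2
  · rw [if_pos h1, pvPatt_small a h1.1, pvPatt_small b h1.2]
    rfl
  · rw [if_neg h1]
    by_cases h2 : a.length = b.length
    · rw [if_neg (by omega)]
      have hab : pvPattList b = pvPattList a ↔ pvSig a = pvSig b := by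
        rw [eq_comm, pvPatt_iff a b h2, pvSig_iff a b h2]
      by_cases hq : pvSig a = pvSig b
      · simp [hq, hab.mpr hq]
      · have : pvPattList b ≠ pvPattList a := fun hc => hq (hab.mp hc)
        simp [hq, this]
    · rw [if_pos h2]
      have hne : pvPattList b ≠ pvPattList a := by
        intro hc
        have := congrArg List.length hc
        rw [pvPatt_len, pvPatt_len] at this
        exact pvC2_ne (by omega) (by omega) this.symm
      simp [hne]
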